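-- pv_equiv track=rewrite | github.com/LATICE-AI/Finnish-Automobile-STT-Latice.AI | wer.py | _collapse_tokens
-- ===== SOURCE A (Python) =====
-- def _collapse_tokens(tokens):
--     collapsed = []
--     i = 0
--     while i < len(tokens):
--         token = tokens[i]
--         if token.startswith("num"):
--             collapsed.append(token)
--             i += 1
--             continue
--
--         if len(token) == 1 and token.isalpha():
--             letters = [token]
--             j = i + 1
--             while j < len(tokens) and len(tokens[j]) == 1 and tokens[j].isalpha():
--                 letters.append(tokens[j])
--                 j += 1
--             collapsed.append("".join(letters))
--             i = j
--             continue
--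
--         collapsed.append(token)
--         i += 1
--     return collapsed
-- ===== SOURCE B (Python) =====
-- def _collapse_tokens(tokens):
--     # Back-to-front: walk the tokens in reverse keeping the pending run of
--     # single letters as a string, emit output reversed, flip it at the end.
--     out = []
--     run = ""
--     for t in reversed(tokens):
--         if len(t) == 1 and t.isalpha():
--             run = t + run
--         else:
--             if run != "":
--                 out.append(run)
--                 run = ""
--             out.append(t)
--     if run != "":
--         out.append(run)
--     out.reverse()
--     return out
-- ===== Notes on version B (the rewrite author's own statement) =====
-- stated objective: alternative
-- what changed: Replaced A's forward index walk with a nested inner scan (and a redundant 'num' branch, unreachable since a 'num...' token has length >= 3) by a single reverse traversal that accumulates the pending single-letter run as a string and builds the output back-to-front, reversing once at the end.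
import Mathlib
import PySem

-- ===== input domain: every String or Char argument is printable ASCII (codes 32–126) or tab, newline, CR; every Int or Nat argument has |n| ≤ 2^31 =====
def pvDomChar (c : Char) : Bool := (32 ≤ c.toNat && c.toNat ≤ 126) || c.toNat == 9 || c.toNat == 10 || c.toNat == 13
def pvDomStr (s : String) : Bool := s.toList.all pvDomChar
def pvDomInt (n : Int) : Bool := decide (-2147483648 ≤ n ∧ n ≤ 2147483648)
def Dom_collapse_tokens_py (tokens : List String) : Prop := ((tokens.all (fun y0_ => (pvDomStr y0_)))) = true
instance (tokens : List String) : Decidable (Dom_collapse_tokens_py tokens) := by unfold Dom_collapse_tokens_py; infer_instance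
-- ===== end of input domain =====

-- B replaces A's forward index walk (with a nested letter-collecting inner loop and a
-- redundant "num" branch) by a single reverse traversal that keeps the pending letter run
-- as a string and builds the output back-to-front, reversing once at the end (alternative).


-- ===== PORT A =====
-- inner while loop: 'while j < len(tokens) and len(tokens[j]) == 1 and tokens[j].isalpha(): letters.append(tokens[j]); j += 1'
-- returns the final (letters, j)
def pvAInner (tokens : List String) (j : Nat) (letters : List String) : List String × Nat :=
  if _h : j < tokens.length ∧ (PySem.Str.len (tokens.getD j "") == 1 && PySem.Str.strIsalpha (tokens.getD j "")) = true then
    pvAInner tokens (j + 1) (letters ++ [tokens.getD j ""])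
  else
    (letters, j)
termination_by tokens.length - j
decreasing_by omega

-- lemma needed for the OUTER loop's termination (i = j jumps forward): the inner loop never moves j back
theorem pvAInner_ge (tokens : List String) (j : Nat) (letters : List String) :
    j ≤ (pvAInner tokens j letters).2 := by
  rw [pvAInner]
  split
  · rename_i h
    have := pvAInner_ge tokens (j + 1) (letters ++ [tokens.getD j ""])
    omega
  · simp
termination_by tokens.length - j
decreasing_by rename_i _h _; omega

-- outer while loop of A
def pvALoop (tokens : List String) (i : Nat) : List String :=
  if h : i < tokens.length then
    let token := tokens.getD i ""
    if PySem.Str.startswith token "num" then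
      token :: pvALoop tokens (i + 1)
    else if (PySem.Str.len token == 1 && PySem.Str.strIsalpha token) = true then
      PySem.Str.join "" (pvAInner tokens (i + 1) [token]).1
        :: pvALoop tokens (pvAInner tokens (i + 1) [token]).2
    else
      token :: pvALoop tokens (i + 1)
  else
    []
termination_by tokens.length - i
decreasing_by
  · omega
  · have := pvAInner_ge tokens (i + 1) [tokens.getD i ""]
    omega
  · omega

def collapse_tokens_py (tokens : List String) : List String := pvALoop tokens 0

-- ===== PORT B =====
-- 'len(t) == 1 and t.isalpha()'
def pvKey (t : String) : Bool := PySem.Str.len t == 1 && PySem.Str.strIsalpha t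

-- one step of B's reverse loop body, state = (out, run)
def pvBStep (s : List String × String) (t : String) : List String × String :=
  if pvKey t then (s.1, t ++ s.2)
  else if s.2 ≠ "" then (s.1 ++ [s.2, t], "")
  else (s.1 ++ [t], "")

-- 'for t in reversed(tokens): …' then the final flush and out.reverse()
def collapse_tokens_py_alt (tokens : List String) : List String :=
  let s := tokens.reverse.foldl pvBStep ([], "")
  (if s.2 ≠ "" then s.1 ++ [s.2] else s.1).reverse

-- ===== PRECONDITION & SPEC =====
def Spec_collapse_tokens_py (tokens : List String) (out : List String) : Prop := out = collapse_tokens_py_alt tokens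
instance (tokens : List String) (out : List String) : Decidable (Spec_collapse_tokens_py tokens out) := by unfold Spec_collapse_tokens_py; infer_instance

-- ===== CLAIM (what is proved, stated in full; the proofs are below) =====
def Claim_equal_collapse_tokens_py : Prop := ∀ (tokens : List String), Dom_collapse_tokens_py tokens → Spec_collapse_tokens_py tokens (collapse_tokens_py tokens)

-- ===== LEMMAS AND PROOFS =====

-- proof-only middle form: group consecutive tokens by pvKey, join the True-groups
def pvBGo : List String → List String
  | [] => []
  | t :: rest =>
    let k := pvKey t
    let grp := rest.takeWhile (fun s => pvKey s == k)
    let rest' := rest.dropWhile (fun s => pvKey s == k)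
    if k then
      PySem.Str.join "" (t :: grp) :: pvBGo rest'
    else
      (t :: grp) ++ pvBGo rest'
termination_by l => l.length
decreasing_by
  all_goals simp only [List.length_cons]
  all_goals exact Nat.lt_succ_of_le (List.length_dropWhile_le _ _)

-- dropping as many elements as the takeWhile prefix is dropWhile
theorem pv_drop_length_takeWhile {α : Type} (p : α → Bool) (l : List α) :
    l.drop (l.takeWhile p).length = l.dropWhile p := by
  induction l with
  | nil => rfl
  | cons a l ih =>
      by_cases h : p a = true
      · simp [h, ih]
      · simp [h]

-- a token starting with "num" has length ≥ 3, hence is never a single letter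
theorem pv_num_not_key (t : String) (h : PySem.Str.startswith t "num" = true) :
    pvKey t = false := by
  have hpre : "num".toList <+: t.toList := by
    have := PySem.Chars.startswith_iff (s := t.toList) (p := "num".toList)
    simp only [PySem.Str.startswith] at h
    exact this.mp h
  have hlen : 3 ≤ t.toList.length := by simpa using hpre.length_le
  have hl : PySem.Str.len t = t.toList.length := by simp [PySem.Str.len]
  simp only [pvKey, Bool.and_eq_false_iff]
  left
  rw [beq_eq_false_iff_ne, hl]
  omega

-- the false-key group of pvBGo contributes its tokens one by one
theorem pvBGo_split_false (l : List String) :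
    l.takeWhile (fun s => pvKey s == false) ++ pvBGo (l.dropWhile (fun s => pvKey s == false)) =
      pvBGo l := by
  cases l with
  | nil => rfl
  | cons a l =>
      by_cases h : pvKey a = true
      · simp [h]
      · rw [Bool.not_eq_true] at h
        conv_rhs => rw [pvBGo.eq_def]
        simp only [List.takeWhile_cons, List.dropWhile_cons, h, beq_self_eq_true, if_true,
          Bool.false_eq_true, if_false, List.cons_append]

-- a false-key head passes through pvBGo individually
theorem pvBGo_false_cons (t : String) (ht : pvKey t = false) (l : List String) :
    pvBGo (t :: l) = t :: pvBGo l := by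
  conv_lhs => rw [pvBGo.eq_def]
  simp only [ht, Bool.false_eq_true, if_false, List.cons_append]
  rw [pvBGo_split_false]

-- a true-key head groups the maximal pvKey-run
theorem pvBGo_group (l : List String) (h : l.takeWhile pvKey ≠ []) :
    pvBGo l = PySem.Str.join "" (l.takeWhile pvKey) :: pvBGo (l.dropWhile pvKey) := by
  cases l with
  | nil => simp at h
  | cons t rest =>
      by_cases hk : pvKey t = true
      · have hpt : (fun s => pvKey s == true) = pvKey := by funext a; simp
        conv_lhs => rw [pvBGo.eq_def]
        simp only [hk, if_true, hpt, List.takeWhile_cons, List.dropWhile_cons]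
      · simp [hk] at h

-- the inner while loop collects exactly the maximal single-letter run from index j
theorem pvAInner_spec (tokens : List String) (j : Nat) (letters : List String) :
    pvAInner tokens j letters =
      (letters ++ (tokens.drop j).takeWhile pvKey,
       j + ((tokens.drop j).takeWhile pvKey).length) := by
  rw [pvAInner]
  split
  · rename_i h
    obtain ⟨hj, hk⟩ := h
    have hdrop : tokens.drop j = tokens.getD j "" :: tokens.drop (j + 1) := by
      rw [List.getD_eq_getElem tokens "" hj]
      exact List.drop_eq_getElem_cons hj
    have := pvAInner_spec tokens (j + 1) (letters ++ [tokens.getD j ""])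
    rw [this, hdrop, List.takeWhile_cons]
    have hk' : pvKey (tokens[j]?.getD "") = true := hk
    simp [hk', List.getD_eq_getElem?_getD]
    omega
  · rename_i h
    by_cases hj : j < tokens.length
    · have hk : (PySem.Str.len (tokens.getD j "") == 1 &&
          PySem.Str.strIsalpha (tokens.getD j "")) = false := by
        rcases Decidable.not_and_iff_not_or_not.mp h with h' | h'
        · exact absurd hj h'
        · exact Bool.not_eq_true _ ▸ h'
      have hdrop : tokens.drop j = tokens.getD j "" :: tokens.drop (j + 1) := by
        rw [List.getD_eq_getElem tokens "" hj]
        exact List.drop_eq_getElem_cons hj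
      have hk' : pvKey (tokens[j]?.getD "") = false := hk
      rw [hdrop, List.takeWhile_cons]
      simp [hk', List.getD_eq_getElem?_getD]
    · rw [List.drop_eq_nil_of_le (by omega)]
      simp
termination_by tokens.length - j
decreasing_by rename_i _h; omega

-- the outer loop from index i equals the grouped pass over the remaining tokens
theorem pvALoop_eq_pvBGo (tokens : List String) (i : Nat) :
    pvALoop tokens i = pvBGo (tokens.drop i) := by
  rw [pvALoop]
  split
  · rename_i hi
    have hdrop : tokens.drop i = tokens.getD i "" :: tokens.drop (i + 1) := by
      rw [List.getD_eq_getElem tokens "" hi]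
      exact List.drop_eq_getElem_cons hi
    by_cases hnum : PySem.Str.startswith (tokens.getD i "") "num" = true
    · simp only [hnum, if_true]
      rw [pvALoop_eq_pvBGo tokens (i + 1), hdrop,
        pvBGo_false_cons _ (pv_num_not_key _ hnum)]
    · simp only [hnum, Bool.false_eq_true, if_false]
      by_cases hkey : pvKey (tokens.getD i "") = true
      · have hkey' : (PySem.Str.len (tokens.getD i "") == 1
            && PySem.Str.strIsalpha (tokens.getD i "")) = true := hkey
        simp only [hkey', if_true]
        rw [pvAInner_spec]
        dsimp only
        rw [pvALoop_eq_pvBGo tokens ((i + 1) + ((tokens.drop (i + 1)).takeWhile pvKey).length)]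
        have hD : tokens.drop ((i + 1) + ((tokens.drop (i + 1)).takeWhile pvKey).length)
            = (tokens.drop (i + 1)).dropWhile pvKey := by
          rw [← List.drop_drop]
          exact pv_drop_length_takeWhile _ _
        rw [hD, hdrop]
        conv_rhs => rw [pvBGo.eq_def]
        have hpt : (fun s => pvKey s == true) = pvKey := by funext a; simp
        simp only [hkey, if_true, List.singleton_append, hpt]
      · rw [Bool.not_eq_true] at hkey
        have hkey' : (PySem.Str.len (tokens.getD i "") == 1
            && PySem.Str.strIsalpha (tokens.getD i "")) = false := hkey
        simp only [hkey', Bool.false_eq_true, if_false]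
        rw [pvALoop_eq_pvBGo tokens (i + 1), hdrop, pvBGo_false_cons _ hkey]
  · rename_i hi
    rw [List.drop_eq_nil_of_le (by omega), pvBGo]
termination_by tokens.length - i
decreasing_by all_goals omega

-- intercalating nothing is flattening
theorem pv_intersperse_nil_flatten {α : Type} (l : List (List α)) :
    (List.intersperse [] l).flatten = l.flatten := by
  induction l with
  | nil => rfl
  | cons a l ih => cases l with
    | nil => simp
    | cons b m => simp_all [List.intersperse]

-- ''.join peels its head: join "" (t :: g) = t ++ join "" g
theorem pv_join_cons (t : String) (g : List String) :
    PySem.Str.join "" (t :: g) = t ++ PySem.Str.join "" g := by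
  apply String.toList_inj.mp
  simp [PySem.Str.join, String.toList_append, PySem.Chars.join, List.intercalate,
    pv_intersperse_nil_flatten]

theorem pv_join_nil : PySem.Str.join "" ([] : List String) = "" := by decide

-- the join of a run headed by a single-character token is never empty
theorem pv_join_ne_empty (t : String) (g : List String) (h : PySem.Str.len t = 1) :
    PySem.Str.join "" (t :: g) ≠ "" := by
  intro hc
  have := congrArg String.toList hc
  simp [PySem.Str.join, PySem.Chars.join, List.intercalate, pv_intersperse_nil_flatten] at this
  have ht : t.toList.length = 1 := by simpa [PySem.Str.len_eq] using h
  simp [this.1] at ht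

theorem pv_key_len (t : String) (h : pvKey t = true) : PySem.Str.len t = 1 := by
  simp only [pvKey, Bool.and_eq_true, beq_iff_eq] at h
  exact h.1

-- empty takeWhile means dropWhile is the identity
theorem pv_dropWhile_of_takeWhile_nil {α : Type} (p : α → Bool) (l : List α)
    (h : l.takeWhile p = []) : l.dropWhile p = l := by
  cases l with
  | nil => rfl
  | cons a l =>
      by_cases ha : p a = true
      · simp [ha] at h
      · simp [ha]

-- B's reverse loop, seen as a foldr: state = (output so far, reversed; pending run string)
theorem pvB_inv (l : List String) :
    l.foldr (fun t s => pvBStep s t) ([], "") =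
      ((pvBGo (l.dropWhile pvKey)).reverse, PySem.Str.join "" (l.takeWhile pvKey)) := by
  induction l with
  | nil => simp [pvBGo, pv_join_nil]
  | cons t l ih =>
      simp only [List.foldr_cons, ih]
      by_cases hk : pvKey t = true
      · simp [pvBStep, hk, pv_join_cons]
      · rw [Bool.not_eq_true] at hk
        cases htw : l.takeWhile pvKey with
        | nil =>
            have hd := pv_dropWhile_of_takeWhile_nil pvKey l htw
            simp [pvBStep, hk, hd, pvBGo_false_cons t hk, pv_join_nil]
        | cons t' g =>
            have ht' : pvKey t' = true := by
              have : t' ∈ l.takeWhile pvKey := by rw [htw]; exact List.mem_cons_self ..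
              exact List.mem_takeWhile_imp this
            have hne := pv_join_ne_empty t' g (pv_key_len t' ht')
            have hgrp := pvBGo_group l (by rw [htw]; simp)
            rw [htw] at hgrp
            simp [pvBStep, hk, hne, pvBGo_false_cons t hk, hgrp, pv_join_nil]
      
-- B equals the grouped pass
theorem pvAlt_eq_pvBGo (tokens : List String) :
    collapse_tokens_py_alt tokens = pvBGo tokens := by
  unfold collapse_tokens_py_alt
  rw [List.foldl_reverse]
  show (let s := tokens.foldr (fun t s => pvBStep s t) ([], "");
    (if s.2 ≠ "" then s.1 ++ [s.2] else s.1).reverse) = pvBGo tokens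
  rw [pvB_inv]
  cases htw : tokens.takeWhile pvKey with
  | nil =>
      have hd := pv_dropWhile_of_takeWhile_nil pvKey tokens htw
      simp [hd, pv_join_nil]
  | cons t' g =>
      have ht' : pvKey t' = true := by
        have : t' ∈ tokens.takeWhile pvKey := by rw [htw]; exact List.mem_cons_self ..
        exact List.mem_takeWhile_imp this
      have hne := pv_join_ne_empty t' g (pv_key_len t' ht')
      have hgrp := pvBGo_group tokens (by rw [htw]; simp)
      rw [htw] at hgrp
      simp [hne, hgrp]

-- ===== VERDICT (by name: the statement is the Claim_ definition above) =====
theorem collapse_tokens_py_spec : Claim_equal_collapse_tokens_py := by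
  intro tokens _
  show collapse_tokens_py tokens = collapse_tokens_py_alt tokens
  rw [pvAlt_eq_pvBGo]
  unfold collapse_tokens_py
  simpa using pvALoop_eq_pvBGo tokens 0
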